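-- pv_equiv track=rewrite | github.com/hunter0707/Comp-Sci-30 | Recursive Algorithms/Exercise1.py | countabc
-- ===== SOURCE A (Python) =====
-- def countabc(n):
--     if len(n) <= 3:
--         if 'abc' == n or 'aba' == n: #base case is if n is abc or aba
--             return 1
--         else:
--             return 0
--     elif n[:3] == 'abc' or n[:3] == 'aba': #removes 3 letters and sees if they are abc or aba
--         return 1 + countabc(n[3:])
--     else:
--         return countabc(n[1:]) #removes 1 if doesn't match
-- ===== SOURCE B (Python) =====
-- def countabc(n):
--     count = 0
--     i = 0
--     L = len(n)
--     while i + 3 <= L: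
--         if n[i] == 'a' and n[i + 1] == 'b' and (n[i + 2] == 'c' or n[i + 2] == 'a'):
--             count += 1
--             i += 3
--         else:
--             i += 1
--     return count
-- ===== Notes on version B (the rewrite author's own statement) =====
-- stated objective: simpler
-- what changed: Replaces A's recursion that repeatedly slices the string (n[:3], n[3:], n[1:]) by a single iterative index loop over the original string with a running counter.
import Mathlib
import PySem

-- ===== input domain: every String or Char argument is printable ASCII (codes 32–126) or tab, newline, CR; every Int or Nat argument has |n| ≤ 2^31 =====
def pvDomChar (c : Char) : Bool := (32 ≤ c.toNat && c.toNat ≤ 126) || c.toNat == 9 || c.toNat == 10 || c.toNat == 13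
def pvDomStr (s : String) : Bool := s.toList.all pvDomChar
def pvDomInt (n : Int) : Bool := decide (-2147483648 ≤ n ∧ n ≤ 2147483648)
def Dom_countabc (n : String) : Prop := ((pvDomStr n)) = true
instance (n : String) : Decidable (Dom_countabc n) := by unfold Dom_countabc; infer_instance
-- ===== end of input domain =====

-- B replaces A's slice-and-recurse scan by a single iterative cursor walk with a counter (no slicing, no recursion).

-- ===== PORT A =====
-- A's recursion, transcribed over the string's character list (Python slices n[:3]/n[3:]/n[1:]
-- are List.take 3 / List.drop 3 / List.drop 1 on the list of characters; exact for all strings).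
def countabcA (l : List Char) : Int :=
  if l.length ≤ 3 then
    if l = ['a','b','c'] ∨ l = ['a','b','a'] then 1 else 0
  else if l.take 3 = ['a','b','c'] ∨ l.take 3 = ['a','b','a'] then
    1 + countabcA (l.drop 3)
  else
    countabcA (l.drop 1)
  termination_by l.length
  decreasing_by all_goals (simp only [List.length_drop]; omega)

def countabc (n : String) : Int := countabcA n.toList

-- ===== PORT B =====
-- B's while-loop over the index i, transcribed as the obvious recursion on the suffix at the
-- cursor: while a 3-character window remains, test it, advance by 3 on a hit and 1 on a miss;
-- when fewer than 3 characters remain the loop ends with the count (here: 0 plus the hits so far).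
def countabcB (l : List Char) : Int :=
  match l with
  | x :: b :: c :: rest' =>
    if x = 'a' ∧ b = 'b' ∧ (c = 'c' ∨ c = 'a') then 1 + countabcB rest'
    else countabcB (b :: c :: rest')
  | _ => 0
  termination_by l.length
  decreasing_by all_goals (simp only [List.length_cons]; omega)

def countabc_alt (n : String) : Int := countabcB n.toList

-- ===== PRECONDITION & SPEC =====
def Spec_countabc (n : String) (out : Int) : Prop := out = countabc_alt n
instance (n : String) (out : Int) : Decidable (Spec_countabc n out) := by unfold Spec_countabc; infer_instance

-- ===== CLAIM (what is proved, stated in full; the proofs are below) =====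
def Claim_equal_countabc : Prop := ∀ (n : String), Dom_countabc n → Spec_countabc n (countabc n)

-- ===== LEMMAS AND PROOFS =====

theorem countabcAB (l : List Char) : countabcA l = countabcB l := by
  generalize hn : l.length = n
  induction n using Nat.strong_induction_on generalizing l with
  | _ n ih =>
    rw [countabcA]
    split_ifs with h1 h2 h3
    · -- short list equal to "abc"/"aba": both sides give 1
      rcases h2 with h | h <;> subst h <;> simp [countabcB]
    · -- short list, no match: both sides give 0
      rcases l with _ | ⟨x, _ | ⟨y, _ | ⟨z, _ | ⟨w, t⟩⟩⟩⟩
      · simp [countabcB]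
      · simp [countabcB]
      · simp [countabcB]
      · rw [countabcB]
        rw [if_neg]
        · simp [countabcB]
        · rintro ⟨hx, hy, hz⟩
          subst hx; subst hy
          rcases hz with hz | hz <;> subst hz
          · exact h2 (Or.inl rfl)
          · exact h2 (Or.inr rfl)
      · simp only [List.length_cons] at h1; omega
    · -- window matches: both count 1 and continue 3 further
      rcases l with _ | ⟨x, _ | ⟨y, _ | ⟨z, rest⟩⟩⟩
      · simp at h1
      · simp at h1
      · simp at h1
      · simp only [List.take_succ_cons, List.take_zero] at h3
        have hx : x = 'a' ∧ y = 'b' ∧ (z = 'c' ∨ z = 'a') := by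
          rcases h3 with h | h <;> injection h with e1 h <;> injection h with e2 h <;>
            injection h with e3 _ <;> subst e1 <;> subst e2 <;> subst e3 <;> simp
        obtain ⟨hx, hy, hz⟩ := hx
        subst hx; subst hy
        rw [countabcB, if_pos ⟨rfl, rfl, hz⟩]
        simp only [List.drop_succ_cons, List.drop_zero]
        have := ih rest.length (by rw [← hn]; simp only [List.length_cons]; omega) rest rfl
        rw [this]
    · -- window misses: both advance one character
      rcases l with _ | ⟨x, _ | ⟨y, _ | ⟨z, rest⟩⟩⟩
      · simp at h1
      · simp at h1
      · simp at h1
      · rw [countabcB]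
        rw [if_neg]
        · simp only [List.drop_succ_cons, List.drop_zero]
          exact ih (y :: z :: rest).length
            (by rw [← hn]; simp only [List.length_cons]; omega) _ rfl
        · rintro ⟨hx, hy, hz⟩
          subst hx; subst hy
          apply h3
          rcases hz with hz | hz <;> subst hz
          · exact Or.inl rfl
          · exact Or.inr rfl

-- ===== VERDICT (by name: the statement is the Claim_ definition above) =====
theorem countabc_spec : Claim_equal_countabc := by
  intro n _
  unfold Spec_countabc countabc countabc_alt
  exact countabcAB _
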